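-- pv_equiv track=rewrite | github.com/MinKyeom/KMK-DREAM | Programmers/Lv0/배열 조각하기.py | solution
-- ===== SOURCE A (Python) =====
-- def solution(arr, query):
--     result = []
--     for x in range(len(query)):
--         if x % 2 == 0:
--             arr = arr[:query[x] + 1]
--         else:
--             arr = arr[query[x]:]
--
--     answer = arr
--     return answer
-- ===== SOURCE B (Python) =====
-- def _clamp(n, k):
--     # Python slice-bound clamping for a window of length n
--     return max(0, n + k) if k < 0 else min(n, k)
--
-- def solution(arr, query):
--     # Track window bounds as integers; slice the original array once at the end
--     lo, hi = 0, len(arr)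
--     for i, q in enumerate(query):
--         n = hi - lo
--         if i % 2 == 0:
--             hi = lo + _clamp(n, q + 1)
--         else:
--             lo = lo + _clamp(n, q)
--     return arr[lo:hi]
-- ===== Notes on version B (the rewrite author's own statement) =====
-- stated objective: alternative
-- what changed: Instead of materialising a new list on every query (arr = arr[:q+1] / arr[q:]), B keeps two integer window bounds lo/hi, clamps them per query with Python's slice rule, and slices the original array once at the end.
import Mathlib
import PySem

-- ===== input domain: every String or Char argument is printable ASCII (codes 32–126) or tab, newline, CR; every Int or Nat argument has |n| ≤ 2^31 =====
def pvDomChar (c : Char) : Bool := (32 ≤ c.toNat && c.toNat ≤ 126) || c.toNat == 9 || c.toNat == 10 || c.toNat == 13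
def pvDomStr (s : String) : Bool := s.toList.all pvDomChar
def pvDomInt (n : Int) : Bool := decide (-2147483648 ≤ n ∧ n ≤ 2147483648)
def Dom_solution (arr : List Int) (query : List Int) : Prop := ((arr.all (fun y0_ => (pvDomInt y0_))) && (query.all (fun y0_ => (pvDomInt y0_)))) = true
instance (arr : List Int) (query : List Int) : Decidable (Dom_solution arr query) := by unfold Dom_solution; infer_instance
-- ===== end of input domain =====

-- B replaces A's per-query list re-slicing by integer window-bound tracking with one final slice (objective: alternative).

-- ===== PORT A =====
def solution (arr : List Int) (query : List Int) : List Int :=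
  let _result : List Int := []
  let arr' :=
    (PySem.List.pyRange 0 (query.length : Int)).foldl
      (fun a x =>
        if PySem.Int.mod x 2 == 0 then
          PySem.List.slice a none (some (PySem.List.pyGetD query x 0 + 1))
        else
          PySem.List.slice a (some (PySem.List.pyGetD query x 0)) none)
      arr
  let answer := arr'
  answer

-- ===== PORT B =====
-- helper of Source B: Python's slice-bound clamping for a window of length n
def pyClamp (n k : Int) : Int := if k < 0 then max 0 (n + k) else min n k

def solution_alt (arr : List Int) (query : List Int) : List Int :=
  let p :=
    (PySem.List.enumerate query 0).foldl
      (fun (lh : Int × Int) iq =>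
        let n := lh.2 - lh.1
        if PySem.Int.mod iq.1 2 == 0 then
          (lh.1, lh.1 + pyClamp n (iq.2 + 1))
        else
          (lh.1 + pyClamp n iq.2, lh.2))
      (0, (arr.length : Int))
  PySem.List.slice arr (some p.1) (some p.2)

-- ===== PRECONDITION & SPEC =====
def Spec_solution (arr : List Int) (query : List Int) (out : List Int) : Prop := out = solution_alt arr query
instance (arr : List Int) (query : List Int) (out : List Int) : Decidable (Spec_solution arr query out) := by unfold Spec_solution; infer_instance

-- ===== CLAIM (what is proved, stated in full; the proofs are below) =====
def Claim_equal_solution : Prop := ∀ (arr : List Int) (query : List Int), Dom_solution arr query → Spec_solution arr query (solution arr query)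

-- ===== LEMMAS AND PROOFS =====

theorem pyClamp_nonneg (n k : Int) (hn : 0 ≤ n) : 0 ≤ pyClamp n k := by
  unfold pyClamp; split_ifs <;> omega

theorem pyClamp_le (n k : Int) (hn : 0 ≤ n) : pyClamp n k ≤ n := by
  unfold pyClamp; split_ifs <;> omega

theorem pyClamp_toNat (L : Nat) (k : Int) :
    (pyClamp (L : Int) k).toNat = PySem.List.clampIdx L k := by
  unfold pyClamp PySem.List.clampIdx; split_ifs <;> omega

theorem slice_none_some (xs : List Int) (b : Int) :
    PySem.List.slice xs none (some b) = xs.take (PySem.List.clampIdx xs.length b) := rfl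

-- A's loop over range(len(query)) indexing query[x] is a fold over enumerate(query)
theorem bridge (g : List Int → Int → Int → List Int) :
    ∀ (qs query : List Int) (s : Nat), query.drop s = qs → ∀ (init : List Int),
      (PySem.List.pyRange (s : Int) (query.length : Int)).foldl
          (fun a x => g a x (PySem.List.pyGetD query x 0)) init
        = (PySem.List.enumerate qs (s : Int)).foldl (fun a p => g a p.1 p.2) init := by
  intro qs
  induction qs with
  | nil =>
      intro query s hdrop init
      have hlen : query.length ≤ s := by simpa using List.drop_eq_nil_iff.mp hdrop
      rw [PySem.List.pyRange_one_eq_nil (by exact_mod_cast hlen)]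
      simp [PySem.List.enumerate]
  | cons q qs ih =>
      intro query s hdrop init
      have hs : s < query.length := by
        by_contra h
        rw [List.drop_eq_nil_iff.mpr (by omega)] at hdrop
        exact absurd hdrop (by simp)
      have hget : query[s]'hs = q := by
        have h0 : query[s]? = some q := by
          have h1 := List.getElem?_drop (xs := query) (i := s) (j := 0)
          rw [hdrop] at h1
          simpa using h1.symm
        have h2 := List.getElem?_eq_getElem (l := query) (i := s) hs
        rw [h0] at h2
        exact (Option.some_inj.mp h2).symm
      have hlt : (s : Int) < (query.length : Int) := by exact_mod_cast hs
      rw [PySem.List.pyRange_one_cons hlt, PySem.List.enumerate_cons]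
      simp only [List.foldl_cons]
      have hv : PySem.List.pyGetD query (s : Int) 0 = q := by
        rw [PySem.List.pyGetD_eq_getElem query 0 (by positivity) (by exact_mod_cast hs)]
        simpa using hget
      rw [hv]
      have hdrop' : query.drop (s + 1) = qs := by
        have := congrArg List.tail hdrop
        simpa [List.tail_drop] using this
      have := ih query (s + 1) hdrop' (g init (s : Int) q)
      have hc : ((s : Int) + 1) = ((s + 1 : Nat) : Int) := by push_cast; ring
      rw [hc]
      exact this

-- invariant: A's current list is the window arr[lo:hi] that B's bound pair describes
theorem main_inv (arr : List Int) :
    ∀ (qs : List Int) (s lo hi : Int), 0 ≤ lo → lo ≤ hi → hi ≤ (arr.length : Int) →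
      (let p := (PySem.List.enumerate qs s).foldl
          (fun (lh : Int × Int) iq =>
            let n := lh.2 - lh.1
            if PySem.Int.mod iq.1 2 == 0 then
              (lh.1, lh.1 + pyClamp n (iq.2 + 1))
            else
              (lh.1 + pyClamp n iq.2, lh.2)) (lo, hi)
       (0 ≤ p.1 ∧ p.1 ≤ p.2 ∧ p.2 ≤ (arr.length : Int)) ∧
       (PySem.List.enumerate qs s).foldl
          (fun a p => if PySem.Int.mod p.1 2 == 0 then
              PySem.List.slice a none (some (p.2 + 1))
            else
              PySem.List.slice a (some p.2) none)
          ((arr.drop lo.toNat).take (hi.toNat - lo.toNat))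
        = (arr.drop p.1.toNat).take (p.2.toNat - p.1.toNat)) := by
  intro qs
  induction qs with
  | nil => intro s lo hi h0 h1 h2; exact ⟨⟨h0, h1, h2⟩, rfl⟩
  | cons q qs ih =>
      intro s lo hi h0 h1 h2
      rw [PySem.List.enumerate_cons]
      simp only [List.foldl_cons]
      set L : Nat := hi.toNat - lo.toNat with hL
      have hcur_len : ((arr.drop lo.toNat).take L).length = L := by
        simp [hL]; omega
      have hnn : (0:Int) ≤ hi - lo := by omega
      have hLi : ((L : Nat) : Int) = hi - lo := by simp [hL]; omega
      by_cases hpar : (PySem.Int.mod s 2 == 0) = true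
      · -- even: shrink hi
        simp only [hpar, reduceIte]
        have hc0 := pyClamp_nonneg (hi - lo) (q + 1) hnn
        have hcle := pyClamp_le (hi - lo) (q + 1) hnn
        have hct : (pyClamp (hi - lo) (q + 1)).toNat = PySem.List.clampIdx L (q + 1) := by
          rw [← hLi]; exact pyClamp_toNat L (q + 1)
        have hstep : PySem.List.slice ((arr.drop lo.toNat).take L) none (some (q + 1))
            = (arr.drop lo.toNat).take ((lo + pyClamp (hi - lo) (q + 1)).toNat - lo.toNat) := by
          rw [slice_none_some, hcur_len, List.take_take]
          congr 1
          have := PySem.List.clampIdx_le L (q + 1)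
          omega
        rw [hstep]
        exact ih (s + 1) lo (lo + pyClamp (hi - lo) (q + 1)) h0 (by omega) (by omega)
      · -- odd: raise lo
        simp only [hpar]
        have hc0 := pyClamp_nonneg (hi - lo) q hnn
        have hcle := pyClamp_le (hi - lo) q hnn
        have hct : (pyClamp (hi - lo) q).toNat = PySem.List.clampIdx L q := by
          rw [← hLi]; exact pyClamp_toNat L q
        have hcl := PySem.List.clampIdx_le L q
        have hstep : PySem.List.slice ((arr.drop lo.toNat).take L) (some q) none
            = (arr.drop (lo + pyClamp (hi - lo) q).toNat).take
                (hi.toNat - (lo + pyClamp (hi - lo) q).toNat) := by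
          rw [PySem.List.slice_some_none, hcur_len, List.drop_take, List.drop_drop]
          congr 1
          · omega
          · congr 1
            omega
        rw [hstep]
        exact ih (s + 1) (lo + pyClamp (hi - lo) q) hi (by omega) (by omega) h2

-- ===== VERDICT (by name: the statement is the Claim_ definition above) =====
theorem solution_spec : Claim_equal_solution := by
  intro arr query _
  unfold Spec_solution solution solution_alt
  have hb := bridge (fun a x v => if PySem.Int.mod x 2 == 0 then PySem.List.slice a none (some (v + 1)) else PySem.List.slice a (some v) none) query query 0 (by simp) arr
  have hm := main_inv arr query 0 0 (arr.length : Int) le_rfl (by positivity) le_rfl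
  simp only [Nat.cast_zero] at hb
  obtain ⟨⟨hp0, hp1, hp2⟩, heq⟩ := hm
  simp only [Int.toNat_zero, List.drop_zero, Int.toNat_natCast, Nat.sub_zero, List.take_length] at heq
  rw [hb, heq, PySem.List.slice_toNat arr hp0 (le_trans hp0 hp1)]
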